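-- pv_equiv track=rewrite | github.com/hamanpaul/dts-build | dtsbuild/agents/compiler.py | _normalize_reference_sort_target
-- ===== SOURCE A (Python) =====
-- def _normalize_reference_sort_target(target: str) -> str:
--     if ":" in target:
--         node_path, prop_name = target.rsplit(":", 1)
--         return f"{_normalize_reference_sort_target(node_path)}:{prop_name}"
--     if target.startswith("/"):
--         return target
--     if target.startswith("&"):
--         return f"/{target}"
--     return f"/&{target}"
-- ===== SOURCE B (Python) =====
-- def _normalize_reference_sort_target(target: str) -> str:
--     head, sep, rest = target.partition(":")
--     if head.startswith("/"):
--         pass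
--     elif head.startswith("&"):
--         head = "/" + head
--     else:
--         head = "/&" + head
--     return head + sep + rest
-- ===== Notes on version B (the rewrite author's own statement) =====
-- stated objective: simpler
-- what changed: Replaces the right-to-left recursion over rsplit(':',1) with a single partition on the first colon: normalize the head once and re-append the untouched tail, no recursion.
import Mathlib
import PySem

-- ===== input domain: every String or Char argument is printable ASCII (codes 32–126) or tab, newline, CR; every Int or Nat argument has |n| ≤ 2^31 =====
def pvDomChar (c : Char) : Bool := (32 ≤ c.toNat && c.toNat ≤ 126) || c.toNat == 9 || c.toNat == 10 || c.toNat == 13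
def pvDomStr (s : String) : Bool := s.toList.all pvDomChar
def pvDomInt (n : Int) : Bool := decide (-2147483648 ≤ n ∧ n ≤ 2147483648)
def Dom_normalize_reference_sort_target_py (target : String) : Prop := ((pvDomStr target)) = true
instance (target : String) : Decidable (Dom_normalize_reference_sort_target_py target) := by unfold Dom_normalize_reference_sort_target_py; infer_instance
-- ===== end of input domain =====

-- B replaces A's rsplit-driven recursion by one partition on the first colon (objective: simpler).

-- ===== PORT A =====
-- first-colon decomposition of a list containing ':' (used by pvGoA's termination proof and by the equivalence proofs below)
theorem pv_split_first (l : List Char) (h : ':' ∈ l) :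
    ∃ p q, l = p ++ ':' :: q ∧ ':' ∉ p ∧
      l.takeWhile (· ≠ ':') = p ∧ l.dropWhile (· ≠ ':') = ':' :: q := by
  induction l with
  | nil => cases h
  | cons c t ih =>
    by_cases hc : c = ':'
    · exact ⟨[], t, by simp [hc], by simp, by simp [hc], by simp [hc]⟩
    · have ht : ':' ∈ t := by
        rcases List.mem_cons.mp h with h1 | h1
        · exact absurd h1.symm hc
        · exact h1
      obtain ⟨p, q, hl, hp, htw, hdw⟩ := ih ht
      refine ⟨c :: p, q, by simp [hl], ?_, ?_, ?_⟩
      · intro hm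
        rcases List.mem_cons.mp hm with h1 | h1
        · exact hc h1.symm
        · exact hp h1
      · rw [List.takeWhile_cons_of_pos (by simp [hc]), htw]
      · rw [List.dropWhile_cons_of_pos (by simp [hc]), hdw]

-- recursive normalizer on the character list; rsplit(":", 1) is done by hand via
-- reverse + takeWhile/dropWhile (exact for the single-character separator ":"):
-- node_path = everything before the LAST ':', prop_name = everything after it
def pvGoA (cs : List Char) : List Char :=
  if h : ':' ∈ cs then
    pvGoA (((cs.reverse.dropWhile (· ≠ ':')).drop 1).reverse)
      ++ ':' :: (cs.reverse.takeWhile (· ≠ ':')).reverse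
  else if PySem.Chars.startswith cs ['/'] then cs
  else if PySem.Chars.startswith cs ['&'] then '/' :: cs
  else '/' :: '&' :: cs
termination_by cs.count ':'
decreasing_by
  obtain ⟨p, q, hl, hp, _, hdw⟩ := pv_split_first cs.reverse (by simpa using h)
  have hc : cs.count ':' = cs.reverse.count ':' := (List.count_reverse ..).symm
  have hp0 : p.count ':' = 0 := List.count_eq_zero.mpr hp
  simp only [List.unattach_reverse, List.unattach_attach]
  rw [hdw]
  simp only [List.drop_succ_cons, List.drop_zero, List.count_reverse]
  rw [hc, hl]
  simp [List.count_append, hp0]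

def normalize_reference_sort_target_py (target : String) : String :=
  String.ofList (pvGoA target.toList)

-- ===== PORT B =====
-- partition on the first colon; head = part before it, rest = separator + tail
-- (empty when there is no colon); normalize the head once and re-append rest
def pvGoB (cs : List Char) : List Char :=
  let head := cs.takeWhile (· ≠ ':')
  let rest := cs.dropWhile (· ≠ ':')
  let nh := if PySem.Chars.startswith head ['/'] then head
            else if PySem.Chars.startswith head ['&'] then '/' :: head
            else '/' :: '&' :: head
  nh ++ rest

def normalize_reference_sort_target_py_alt (target : String) : String :=
  String.ofList (pvGoB target.toList)

-- ===== PRECONDITION & SPEC =====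
def Spec_normalize_reference_sort_target_py (target : String) (out : String) : Prop := out = normalize_reference_sort_target_py_alt target
instance (target : String) (out : String) : Decidable (Spec_normalize_reference_sort_target_py target out) := by unfold Spec_normalize_reference_sort_target_py; infer_instance

-- ===== CLAIM (what is proved, stated in full; the proofs are below) =====
def Claim_equal_normalize_reference_sort_target_py : Prop := ∀ (target : String), Dom_normalize_reference_sort_target_py target → Spec_normalize_reference_sort_target_py target (normalize_reference_sort_target_py target)

-- ===== LEMMAS AND PROOFS =====

theorem pv_tw_app (a b : List Char) (h : ':' ∉ a) :
    (a ++ ':' :: b).takeWhile (· ≠ ':') = a := by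
  induction a with
  | nil => simp
  | cons c t ih =>
    have hc : c ≠ ':' := fun hc => h (by simp [hc])
    rw [List.cons_append, List.takeWhile_cons_of_pos (by simp [hc]),
      ih (fun hm => h (List.mem_cons_of_mem _ hm))]

theorem pv_dw_app (a b : List Char) (h : ':' ∉ a) :
    (a ++ ':' :: b).dropWhile (· ≠ ':') = ':' :: b := by
  induction a with
  | nil => simp
  | cons c t ih =>
    have hc : c ≠ ':' := fun hc => h (by simp [hc])
    rw [List.cons_append, List.dropWhile_cons_of_pos (by simp [hc]),
      ih (fun hm => h (List.mem_cons_of_mem _ hm))]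

-- B is compositional in a trailing colon segment
theorem pvGoB_append (a b : List Char) : pvGoB (a ++ ':' :: b) = pvGoB a ++ ':' :: b := by
  by_cases h : ':' ∈ a
  · obtain ⟨p, q, hl, hp, htw, hdw⟩ := pv_split_first a h
    have htw2 : (a ++ ':' :: b).takeWhile (· ≠ ':') = p := by
      rw [hl, List.append_assoc, List.cons_append, pv_tw_app _ _ hp]
    have hdw2 : (a ++ ':' :: b).dropWhile (· ≠ ':') = ':' :: (q ++ ':' :: b) := by
      rw [hl, List.append_assoc, List.cons_append, pv_dw_app _ _ hp]
    simp only [pvGoB, ne_eq, decide_not]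
    simp only [ne_eq, decide_not] at htw hdw htw2 hdw2
    rw [htw, hdw, htw2, hdw2]
    simp
  · have htw : a.takeWhile (· ≠ ':') = a :=
      List.takeWhile_eq_self_iff.mpr (fun x hx => by
        simp only [decide_eq_true_eq]; exact fun hxe => h (hxe ▸ hx))
    have hdw : a.dropWhile (· ≠ ':') = [] :=
      List.dropWhile_eq_nil_iff.mpr (fun x hx => by
        simp only [decide_eq_true_eq]; exact fun hxe => h (hxe ▸ hx))
    have htw2 := pv_tw_app a b h
    have hdw2 := pv_dw_app a b h
    simp only [pvGoB, ne_eq, decide_not]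
    simp only [ne_eq, decide_not] at htw hdw htw2 hdw2
    rw [htw, hdw, htw2, hdw2]
    simp

theorem pvGoA_eq_pvGoB (cs : List Char) : pvGoA cs = pvGoB cs := by
  induction hn : cs.count ':' using Nat.strong_induction_on generalizing cs with
  | _ n ih =>
    by_cases h : ':' ∈ cs
    · obtain ⟨p, q, hl, hp, htw, hdw⟩ := pv_split_first cs.reverse (by simpa using h)
      have hcs : cs = q.reverse ++ ':' :: p.reverse := by
        have := congrArg List.reverse hl
        simpa using this
      have hcount : q.count ':' < n := by
        have hp0 : p.count ':' = 0 := List.count_eq_zero.mpr hp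
        have : cs.count ':' = cs.reverse.count ':' := (List.count_reverse ..).symm
        rw [hn] at this
        rw [hl] at this
        simp [List.count_append, hp0] at this
        omega
      rw [pvGoA, dif_pos h, htw, hdw]
      simp only [List.drop_succ_cons, List.drop_zero]
      rw [ih (q.reverse.count ':') (by simpa using hcount) q.reverse rfl]
      rw [hcs, pvGoB_append]
    · rw [pvGoA, dif_neg h]
      have htw : cs.takeWhile (· ≠ ':') = cs :=
        List.takeWhile_eq_self_iff.mpr (fun x hx => by
          simp only [decide_eq_true_eq]; exact fun hxe => h (hxe ▸ hx))
      have hdw : cs.dropWhile (· ≠ ':') = [] :=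
        List.dropWhile_eq_nil_iff.mpr (fun x hx => by
          simp only [decide_eq_true_eq]; exact fun hxe => h (hxe ▸ hx))
      simp only [pvGoB, ne_eq, decide_not]
      simp only [ne_eq, decide_not] at htw hdw
      rw [htw, hdw]
      simp

-- ===== VERDICT (by name: the statement is the Claim_ definition above) =====
theorem normalize_reference_sort_target_py_spec : Claim_equal_normalize_reference_sort_target_py := by
  intro target _
  unfold Spec_normalize_reference_sort_target_py normalize_reference_sort_target_py normalize_reference_sort_target_py_alt
  rw [pvGoA_eq_pvGoB]
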